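-- pv_equiv track=rewrite | github.com/miloczek/Projekty-II-UWR | my python/Zadanie python/kolos/kolos zad 2.py | f
-- ===== SOURCE A (Python) =====
-- def f(s):
--     r = []
--     for i in range(len(s)):
--         if s[i] == 'a':
--             r.append(s[i] + '*')
--         else:
--             r.append(2 * s[i])
--     return "".join(r)
-- ===== SOURCE B (Python) =====
-- def f(s):
--     return 'a*'.join(''.join(c + c for c in part) for part in s.split('a'))
-- ===== Notes on version B (the rewrite author's own statement) =====
-- stated objective: idiomatic
-- what changed: Replaces the index loop with a per-character conditional by a split/transform/join pipeline: split on 'a', double every character of each run, rejoin with the literal 'a*'.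
import Mathlib
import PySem

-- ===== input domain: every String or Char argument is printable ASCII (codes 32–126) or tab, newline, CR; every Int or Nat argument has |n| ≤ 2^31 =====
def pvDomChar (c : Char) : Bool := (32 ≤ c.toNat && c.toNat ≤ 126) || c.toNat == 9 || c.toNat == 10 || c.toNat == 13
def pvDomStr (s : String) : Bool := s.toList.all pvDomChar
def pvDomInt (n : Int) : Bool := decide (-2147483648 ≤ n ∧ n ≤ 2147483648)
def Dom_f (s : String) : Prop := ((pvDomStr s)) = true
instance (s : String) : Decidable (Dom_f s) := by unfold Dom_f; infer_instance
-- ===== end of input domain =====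

-- B replaces A's per-character conditional index loop by a split-on-'a' / double-each-run / join-with-"a*" pipeline (objective: idiomatic).

-- ===== PORT A =====
-- for i in range(len(s)): if s[i] == 'a': r.append(s[i] + '*') else: r.append(2 * s[i]); "".join(r)
def f (s : String) : String :=
  let r : List (List Char) :=
    (PySem.List.pyRange 0 (PySem.Str.len s) 1).foldl
      (fun r i =>
        let c := PySem.List.pyGetD s.toList i ' '   -- s[i]; i is always in range here
        if c == 'a' then r ++ [[c, '*']] else r ++ [[c, c]]) []
  String.ofList (PySem.Chars.join [] r)

-- ===== PORT B =====
-- 'a*'.join(''.join(c + c for c in part) for part in s.split('a'))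
def f_alt (s : String) : String :=
  String.ofList (PySem.Chars.join ['a', '*']
    ((PySem.Chars.splitOn s.toList ['a']).map
      (fun part => PySem.Chars.join [] (part.map (fun c => [c, c])))))

-- ===== PRECONDITION & SPEC =====
def Spec_f (s : String) (out : String) : Prop := out = f_alt s
instance (s : String) (out : String) : Decidable (Spec_f s out) := by unfold Spec_f; infer_instance

-- ===== CLAIM (what is proved, stated in full; the proofs are below) =====
def Claim_equal_f : Prop := ∀ (s : String), Dom_f s → Spec_f s (f s)

-- ===== LEMMAS AND PROOFS =====

-- one transformed character: 'a'→"a*", anything else doubled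
def pvStep (c : Char) : List Char := if c == 'a' then [c, '*'] else [c, c]

-- structural model of s.split('a') with an accumulated current piece
def pvSplitA (pre : List Char) : List Char → List (List Char)
  | [] => [pre]
  | c :: rest => if c = 'a' then pre :: pvSplitA [] rest else pvSplitA (pre ++ [c]) rest

lemma pvSplitA_ne_nil (pre : List Char) (l : List Char) : pvSplitA pre l ≠ [] := by
  induction l generalizing pre with
  | nil => simp [pvSplitA]
  | cons c rest ih =>
      simp only [pvSplitA]
      split
      · simp
      · exact ih _

lemma pvJoin_nil_sep (l : List (List Char)) :
    PySem.Chars.join [] l = l.flatten := by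
  induction l with
  | nil => simp [PySem.Chars.join_nil]
  | cons x xs ih =>
      cases xs with
      | nil => simp [PySem.Chars.join_singleton]
      | cons y ys =>
          rw [PySem.Chars.join_cons_cons]
          simp [ih]

lemma pvJoin_cons (sep x : List Char) (xs : List (List Char)) (h : xs ≠ []) :
    PySem.Chars.join sep (x :: xs) = x ++ sep ++ PySem.Chars.join sep xs := by
  cases xs with
  | nil => exact absurd rfl h
  | cons y ys => exact PySem.Chars.join_cons_cons sep x y ys

lemma pvGo_eq (fuel : Nat) (l cur : List Char) (acc2 : List (List Char))
    (h : l.length ≤ fuel) :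
    PySem.Chars.splitOn.go ['a'] fuel l cur acc2 = acc2.reverse ++ pvSplitA cur.reverse l := by
  induction fuel generalizing l cur acc2 with
  | zero =>
      have hl : l = [] := List.eq_nil_of_length_eq_zero (Nat.le_zero.mp h)
      subst hl
      simp [PySem.Chars.splitOn.go, pvSplitA]
  | succ fuel ih =>
      cases l with
      | nil => simp [PySem.Chars.splitOn.go, pvSplitA]
      | cons c rest =>
          by_cases hc : c = 'a'
          · subst hc
            have hpre : (['a'] : List Char).isPrefixOf ('a' :: rest) = true := by
              simp [List.isPrefixOf]
            simp only [PySem.Chars.splitOn.go, hpre, if_true, List.length_cons, List.drop_succ_cons, List.length_nil, List.drop_zero]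
            rw [ih rest [] (cur.reverse :: acc2) (by simpa using Nat.le_of_succ_le_succ h)]
            simp [pvSplitA]
          · have hpre : (['a'] : List Char).isPrefixOf (c :: rest) = false := by
              simp [List.isPrefixOf, Ne.symm hc]
            simp only [PySem.Chars.splitOn.go, hpre, Bool.false_eq_true, if_false]
            rw [ih rest (c :: cur) acc2 (by simpa using Nat.le_of_succ_le_succ h)]
            simp [pvSplitA, hc]

lemma pvSplitOn_eq (cs : List Char) :
    PySem.Chars.splitOn cs ['a'] = pvSplitA [] cs := by
  have := pvGo_eq (cs.length + 1) cs [] [] (by omega)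
  simpa [PySem.Chars.splitOn] using this

-- doubling a run, as B computes it
def pvDbl (part : List Char) : List Char := PySem.Chars.join [] (part.map (fun c => [c, c]))

lemma pvKey (cs pre : List Char) :
    PySem.Chars.join ['a', '*'] ((pvSplitA pre cs).map pvDbl)
      = pvDbl pre ++ (cs.map pvStep).flatten := by
  induction cs generalizing pre with
  | nil => simp [pvSplitA, PySem.Chars.join_singleton]
  | cons c rest ih =>
      by_cases hc : c = 'a'
      · subst hc
        simp only [pvSplitA, if_true, List.map_cons]
        rw [pvJoin_cons _ _ _ (by
          simp only [ne_eq, List.map_eq_nil_iff]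
          exact pvSplitA_ne_nil [] rest)]
        rw [ih []]
        simp [pvDbl, pvStep, PySem.Chars.join_nil]
      · simp only [pvSplitA, hc, if_false]
        rw [ih (pre ++ [c])]
        simp [pvStep, hc, pvDbl, pvJoin_nil_sep]

lemma pvA_eq (s : String) :
    f s = String.ofList ((s.toList.map pvStep).flatten) := by
  unfold f
  simp only [PySem.Str.len]
  have h1 : List.foldl
      (fun (r : List (List Char)) (i : Int) =>
        let c := PySem.List.pyGetD s.toList i ' '
        if c == 'a' then r ++ [[c, '*']] else r ++ [[c, c]])
      [] (PySem.List.pyRange 0 (s.toList.length : Int) 1)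
      = List.foldl (fun (r : List (List Char)) (c : Char) =>
          if c == 'a' then r ++ [[c, '*']] else r ++ [[c, c]]) [] s.toList :=
    PySem.List.foldl_pyRange_zero_pyGetD' s.toList ' '
      (fun (r : List (List Char)) (c : Char) =>
        if c == 'a' then r ++ [[c, '*']] else r ++ [[c, c]]) []
  rw [h1, show (fun (r : List (List Char)) (c : Char) =>
        if c == 'a' then r ++ [[c, '*']] else r ++ [[c, c]])
      = (fun r c => r ++ [pvStep c]) from by
        funext r c
        by_cases hc : c = 'a' <;> simp [pvStep, hc]]
  rw [PySem.List.foldl_append_singleton_eq_map]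
  simp [pvJoin_nil_sep]

lemma pvB_eq (s : String) :
    f_alt s = String.ofList ((s.toList.map pvStep).flatten) := by
  unfold f_alt
  rw [pvSplitOn_eq,
    show (fun part => PySem.Chars.join [] (List.map (fun c => [c, c]) part)) = pvDbl from rfl,
    pvKey s.toList []]
  simp [pvDbl, PySem.Chars.join_nil]

-- ===== VERDICT (by name: the statement is the Claim_ definition above) =====
theorem f_spec : Claim_equal_f := by
  intro s _
  unfold Spec_f
  rw [pvA_eq, pvB_eq]
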